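-- pv_equiv track=rewrite | github.com/escholino/EMME | StrategyFindingForBatteries.py | shuffelMarket
-- ===== SOURCE A (Python) =====
-- from itertools import product
--
-- def shuffelMarket(lst):
--     for doslice in product([True, False], repeat=len(lst) - 1):
--         slices = []
--         start = 0
--         for i, slicehere in enumerate(doslice, 1):
--             if slicehere:
--                 slices.append(lst[start:i])
--                 start = i
--         slices.append(lst[start:])
--         yield slices
-- ===== SOURCE B (Python) =====
-- def shuffelMarket(lst):
--     # Recursive generator over the length of the first block: for each k,
--     # take lst[:k] as the leading block and partition the rest.
--     def parts(sub):
--         if not sub: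
--             yield []
--             return
--         for k in range(1, len(sub) + 1):
--             head = sub[:k]
--             for rest in parts(sub[k:]):
--                 yield [head] + rest
--     yield from parts(lst)
-- ===== Notes on version B (the rewrite author's own statement) =====
-- stated objective: alternative
-- what changed: Replaces the enumeration of boolean cut-masks via itertools.product plus an index/slice fold with a direct recursion on the length of the first block, which reproduces the same partitions in the same order.
import Mathlib
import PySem

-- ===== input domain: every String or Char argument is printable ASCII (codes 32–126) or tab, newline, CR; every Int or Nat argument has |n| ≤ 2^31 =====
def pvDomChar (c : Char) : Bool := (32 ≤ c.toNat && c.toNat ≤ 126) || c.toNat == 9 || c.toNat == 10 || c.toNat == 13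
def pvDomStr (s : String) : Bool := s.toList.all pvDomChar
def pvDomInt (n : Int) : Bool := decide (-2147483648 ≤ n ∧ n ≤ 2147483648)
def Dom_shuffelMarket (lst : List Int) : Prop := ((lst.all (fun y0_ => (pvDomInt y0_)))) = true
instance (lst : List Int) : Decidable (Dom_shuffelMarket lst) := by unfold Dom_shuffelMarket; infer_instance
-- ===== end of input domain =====

-- B replaces A's product-of-cut-masks enumeration by a recursion on the length of the first block
-- (same partitions, same order); on the empty list A raises ValueError while B yields [[]].

-- ===== PORT A =====
-- product([True, False], repeat=n), tuples in itertools.product order (True first, rightmost fastest)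
def pvProdTF : Nat → List (List Bool)
  | 0 => [[]]
  | n + 1 => (pvProdTF n).map (fun t => true :: t) ++ (pvProdTF n).map (fun t => false :: t)

-- body of A's inner for-loop: state (slices, start), item (i, slicehere)
def pvStep (lst : List Int) (s : List (List Int) × Int) (ib : Int × Bool) : List (List Int) × Int :=
  if ib.2 then (s.1 ++ [PySem.List.slice lst (some s.2) (some ib.1)], ib.1) else s

def shuffelMarket (lst : List Int) : List (List (List Int)) :=
  (pvProdTF (lst.length - 1)).map (fun doslice =>
    let st := (PySem.List.enumerate doslice 1).foldl (pvStep lst) (([] : List (List Int)), (0 : Int))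
    st.1 ++ [PySem.List.slice lst (some st.2) none])

-- ===== PORT B =====
-- Source B's parts(sub): for k in 1..len(sub): yield [sub[:k]] + each partition of sub[k:];
-- fuel only makes the recursion structural (any fuel > len(sub) computes the same list).
def pvParts : Nat → List Int → List (List (List Int))
  | 0, _ => []
  | _ + 1, [] => [[]]
  | fuel + 1, x :: xs =>
    (PySem.List.pyRange 1 (((x :: xs).length : Int) + 1) 1).flatMap (fun k =>
      (pvParts fuel (PySem.List.slice (x :: xs) (some k) none)).map
        (fun rest => PySem.List.slice (x :: xs) none (some k) :: rest))

def shuffelMarket_alt (lst : List Int) : List (List (List Int)) :=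
  pvParts (lst.length + 1) lst

-- ===== PRECONDITION & SPEC =====
-- Pre_ excludes only the empty list, on which A raises ValueError (product with repeat=-1)
-- while B yields the single empty partition; A returns no value there.
def Pre_shuffelMarket (lst : List Int) : Prop := lst ≠ []
instance (lst : List Int) : Decidable (Pre_shuffelMarket lst) := by unfold Pre_shuffelMarket; infer_instance
def pvWitness_shuffelMarket : List Int := [1, 2]

def Spec_shuffelMarket (lst : List Int) (out : List (List (List Int))) : Prop := out = shuffelMarket_alt lst
instance (lst : List Int) (out : List (List (List Int))) : Decidable (Spec_shuffelMarket lst out) := by unfold Spec_shuffelMarket; infer_instance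

-- ===== CLAIM (what is proved, stated in full; the proofs are below) =====
def Claim_equal_shuffelMarket : Prop := ∀ (lst : List Int), Dom_shuffelMarket lst → Pre_shuffelMarket lst → Spec_shuffelMarket lst (shuffelMarket lst)

-- ===== LEMMAS AND PROOFS =====

-- blocks of a partition determined by a list of cut decisions, relative form:
-- cur = current (open) block, one decision consumed per element
def pvH : List Int → List Int → List Bool → List (List Int)
  | cur, xs, [] => [cur ++ xs]
  | cur, x :: xs, b :: ds => if b then (cur ++ [x]) :: pvH [] xs ds else pvH (cur ++ [x]) xs ds
  | _, [], _ :: _ => []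

-- prefix the first block of a partition with cur
def pvPfx (cur : List Int) : List (List Int) → List (List Int)
  | [] => []
  | h :: t => (cur ++ h) :: t

lemma pvTakeSucc (lst : List Int) (start pos : Nat) (h1 : start ≤ pos) (h2 : pos < lst.length) :
    (lst.drop start).take (pos - start) ++ [lst[pos]] = (lst.drop start).take (pos + 1 - start) := by
  have hps : pos - start < (lst.drop start).length := by simp; omega
  rw [show pos + 1 - start = (pos - start) + 1 by omega, List.take_add_one,
      List.getElem?_eq_getElem hps, List.getElem_drop]
  simp only [show start + (pos - start) = pos from by omega, Option.toList_some]

lemma pvFoldA (lst : List Int) : ∀ (ds : List Bool) (acc : List (List Int)) (start pos : Nat),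
    start ≤ pos → pos + ds.length + 1 = lst.length →
    ((PySem.List.enumerate ds ((pos : Int) + 1)).foldl (pvStep lst) (acc, (start : Int))).1
      ++ [PySem.List.slice lst
            (some ((PySem.List.enumerate ds ((pos : Int) + 1)).foldl (pvStep lst) (acc, (start : Int))).2) none]
    = acc ++ pvH ((lst.drop start).take (pos - start)) (lst.drop pos) ds := by
  intro ds
  induction ds with
  | nil =>
    intro acc start pos h1 h2
    simp only [PySem.List.enumerate_nil, List.foldl_nil, pvH]
    rw [PySem.List.slice_from_natCast]
    rw [show lst.drop pos = (lst.drop start).drop (pos - start) by rw [List.drop_drop]; congr 1; omega]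
    rw [List.take_append_drop]
  | cons b ds ih =>
    intro acc start pos h1 h2
    have hpos : pos < lst.length := by simp at h2 ⊢; omega
    rw [PySem.List.enumerate_cons]
    simp only [List.foldl_cons]
    rw [List.drop_eq_getElem_cons hpos, pvH]
    cases b with
    | true =>
      simp only [pvStep, reduceIte]
      have := ih (acc ++ [PySem.List.slice lst (some (start : Int)) (some ((pos : Int) + 1))]) (pos + 1) (pos + 1) (le_refl _) (by simp at h2 ⊢; omega)
      rw [show ((pos : Int) + 1) = (((pos + 1 : Nat) : Int)) from by push_cast; ring] at this ⊢
      rw [this]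
      simp only [Nat.sub_self, List.take_zero, List.append_assoc, List.singleton_append]
      rw [PySem.List.slice_natCast]
      rw [← pvTakeSucc lst start pos h1 hpos]
    | false =>
      simp only [pvStep, Bool.false_eq_true, if_false]
      have := ih acc start (pos + 1) (by omega) (by simp at h2 ⊢; omega)
      rw [show ((pos : Int) + 1) + 1 = (((pos + 1 : Nat) : Int)) + 1 from by push_cast; ring]
      rw [this]
      rw [← pvTakeSucc lst start pos h1 hpos]

lemma pvProdTF_length {n : Nat} {ds : List Bool} (h : ds ∈ pvProdTF n) : ds.length = n := by
  induction n generalizing ds with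
  | zero => simp [pvProdTF] at h; simp [h]
  | succ n ih =>
    simp only [pvProdTF, List.mem_append, List.mem_map] at h
    rcases h with ⟨t, ht, rfl⟩ | ⟨t, ht, rfl⟩ <;> simp [ih ht]

lemma pvA_eq_mapH (lst : List Int) (h : lst ≠ []) :
    shuffelMarket lst = (pvProdTF (lst.length - 1)).map (pvH [] lst) := by
  unfold shuffelMarket
  refine List.map_congr_left (fun ds hds => ?_)
  have hlen : ds.length = lst.length - 1 := pvProdTF_length hds
  have hl : 1 ≤ lst.length := by cases lst with | nil => exact absurd rfl h | cons a l => simp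
  have := pvFoldA lst ds [] 0 0 (le_refl _) (by omega)
  simpa using this

lemma pvParts_fuel : ∀ (f : Nat) (g : Nat) (sub : List Int), sub.length < f → sub.length < g →
    pvParts f sub = pvParts g sub := by
  intro f
  induction f with
  | zero => intro g sub hf; omega
  | succ f ih =>
    intro g sub hf hg
    cases g with
    | zero => omega
    | succ g =>
      cases sub with
      | nil => rfl
      | cons x xs =>
        simp only [pvParts]
        refine List.flatMap_congr (fun k hk => ?_)
        rw [PySem.List.mem_pyRange_one] at hk
        rw [show PySem.List.slice (x :: xs) (some k) none = (x :: xs).drop k.toNat from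
          PySem.List.slice_from _ (by omega)]
        have hlen : ((x :: xs).drop k.toNat).length < f ∧ ((x :: xs).drop k.toNat).length < g := by
          simp at hf hg ⊢
          omega
        rw [ih g _ hlen.1 hlen.2]

lemma pvParts_ne_nil {f : Nat} {x : Int} {xs : List Int} {p : List (List Int)}
    (h : p ∈ pvParts (f + 1) (x :: xs)) : p ≠ [] := by
  simp only [pvParts, List.mem_flatMap, List.mem_map] at h
  obtain ⟨k, -, r, -, rfl⟩ := h
  simp

lemma pvMapPfxNil {m : Nat} {y : Int} {ys : List Int} :
    (pvParts (m + 1) (y :: ys)).map (pvPfx []) = pvParts (m + 1) (y :: ys) := by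
  rw [List.map_congr_left (fun p hp => ?_), List.map_id]
  have := pvParts_ne_nil hp
  cases p with
  | nil => exact absurd rfl this
  | cons h t => simp [pvPfx]

lemma pvC : ∀ (xs : List Int), xs ≠ [] → ∀ (cur : List Int),
    (pvProdTF (xs.length - 1)).map (pvH cur xs) =
    (pvParts (xs.length + 1) xs).map (pvPfx cur) := by
  intro xs
  induction xs with
  | nil => intro h; exact absurd rfl h
  | cons x xs ih =>
    intro _ cur
    cases xs with
    | nil =>
      have hr : PySem.List.pyRange 1 2 1 = [1] := by decide
      have h1 : PySem.List.slice [x] (some (1 : Int)) none = [] := rfl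
      have h2 : PySem.List.slice [x] none (some (1 : Int)) = [x] := rfl
      simp [pvProdTF, pvH, pvParts, hr, h1, h2, pvPfx]
    | cons y ys =>
      have hne : (y :: ys) ≠ [] := by simp
      -- LHS
      rw [show (x :: y :: ys).length - 1 = ys.length + 1 from by simp,
          show pvProdTF (ys.length + 1) =
            (pvProdTF ys.length).map (fun t => true :: t) ++
            (pvProdTF ys.length).map (fun t => false :: t) from rfl]
      rw [List.map_append, List.map_map, List.map_map]
      have hT : ∀ cur', (pvProdTF ys.length).map (pvH cur' (y :: ys)) =
          (pvParts (ys.length + 2) (y :: ys)).map (pvPfx cur') := by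
        intro cur'
        have := ih hne cur'
        rw [show (y :: ys).length - 1 = ys.length from by simp,
            show (y :: ys).length + 1 = ys.length + 2 from by simp] at this
        exact this
      have hpart1 : (pvProdTF ys.length).map ((fun ds => pvH cur (x :: y :: ys) ds) ∘ fun t => true :: t)
          = (pvParts (ys.length + 2) (y :: ys)).map (fun r => (cur ++ [x]) :: r) := by
        have heq : (pvProdTF ys.length).map ((fun ds => pvH cur (x :: y :: ys) ds) ∘ fun t => true :: t)
            = ((pvProdTF ys.length).map (pvH [] (y :: ys))).map (fun r => (cur ++ [x]) :: r) := by
          simp [Function.comp, pvH]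
        rw [heq, hT [], show ys.length + 2 = (ys.length + 1) + 1 from rfl, pvMapPfxNil]
      have hpart2 : (pvProdTF ys.length).map ((fun ds => pvH cur (x :: y :: ys) ds) ∘ fun t => false :: t)
          = (pvParts (ys.length + 2) (y :: ys)).map (pvPfx (cur ++ [x])) := by
        have heq : (pvProdTF ys.length).map ((fun ds => pvH cur (x :: y :: ys) ds) ∘ fun t => false :: t)
            = (pvProdTF ys.length).map (pvH (cur ++ [x]) (y :: ys)) := by
          simp [Function.comp, pvH]
        rw [heq, hT]
      rw [hpart1, hpart2]
      -- RHS
      rw [show (x :: y :: ys).length + 1 = (ys.length + 2) + 1 from by simp]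
      rw [show pvParts ((ys.length + 2) + 1) (x :: y :: ys) =
        (PySem.List.pyRange 1 (((x :: y :: ys).length : Int) + 1) 1).flatMap (fun k =>
          (pvParts (ys.length + 2) (PySem.List.slice (x :: y :: ys) (some k) none)).map
            (fun rest => PySem.List.slice (x :: y :: ys) none (some k) :: rest)) from rfl]
      rw [show ((x :: y :: ys).length : Int) + 1 = (ys.length : Int) + 3 from by simp; ring]
      rw [PySem.List.pyRange_one_cons (by omega), show (1 : Int) + 1 = 2 from by norm_num]
      rw [List.flatMap_cons, List.map_append]
      congr 1
      · -- k = 1 piece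
        rw [show PySem.List.slice (x :: y :: ys) (some (1 : Int)) none = y :: ys from
            PySem.List.slice_from_one _]
        rw [show PySem.List.slice (x :: y :: ys) none (some (1 : Int)) = [x] from by
            rw [PySem.List.slice_to _ (by norm_num)]; rfl]
        rw [List.map_map]
        refine List.map_congr_left (fun p _ => ?_)
        simp [pvPfx]
      · -- k ≥ 2 pieces
        rw [show pvParts (ys.length + 2) (y :: ys) =
          (PySem.List.pyRange 1 (((y :: ys).length : Int) + 1) 1).flatMap (fun j =>
            (pvParts (ys.length + 1) (PySem.List.slice (y :: ys) (some j) none)).map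
              (fun rest => PySem.List.slice (y :: ys) none (some j) :: rest)) from rfl]
        rw [show ((y :: ys).length : Int) + 1 = (ys.length : Int) + 2 from by simp; ring]
        rw [List.map_flatMap, List.map_flatMap]
        rw [PySem.List.pyRange_one 2 ((ys.length : Int) + 3),
            PySem.List.pyRange_one 1 ((ys.length : Int) + 2)]
        rw [show ((ys.length : Int) + 3 - 2).toNat = ys.length + 1 from by omega,
            show ((ys.length : Int) + 2 - 1).toNat = ys.length + 1 from by omega]
        rw [List.flatMap_map, List.flatMap_map]
        refine List.flatMap_congr (fun i hi => ?_)
        rw [List.mem_range] at hi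
        rw [show PySem.List.slice (x :: y :: ys) (some ((2 : Int) + i)) none
              = (y :: ys).drop (1 + i) from by
            rw [PySem.List.slice_from _ (by omega)]
            rw [show ((2 : Int) + i).toNat = (1 + i) + 1 from by omega]
            rw [List.drop_succ_cons]]
        rw [show PySem.List.slice (y :: ys) (some ((1 : Int) + i)) none
              = (y :: ys).drop (1 + i) from by
            rw [PySem.List.slice_from _ (by omega)]
            rw [show ((1 : Int) + i).toNat = 1 + i from by omega]]
        rw [show PySem.List.slice (x :: y :: ys) none (some ((2 : Int) + i))
              = x :: (y :: ys).take (1 + i) from by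
            rw [PySem.List.slice_to _ (by omega)]
            rw [show ((2 : Int) + i).toNat = (1 + i) + 1 from by omega]
            rw [List.take_succ_cons]]
        rw [show PySem.List.slice (y :: ys) none (some ((1 : Int) + i))
              = (y :: ys).take (1 + i) from by
            rw [PySem.List.slice_to _ (by omega)]
            rw [show ((1 : Int) + i).toNat = 1 + i from by omega]]
        rw [pvParts_fuel (ys.length + 2) (ys.length + 1) ((y :: ys).drop (1 + i))
              (by simp only [List.length_drop, List.length_cons]; omega)
              (by simp only [List.length_drop, List.length_cons]; omega)]
        rw [List.map_map, List.map_map]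
        refine List.map_congr_left (fun r _ => ?_)
        simp [pvPfx]

-- ===== VERDICT (by name: the statement is the Claim_ definition above) =====
theorem shuffelMarket_spec : Claim_equal_shuffelMarket := by
  intro lst _ hpre
  unfold Spec_shuffelMarket
  rw [pvA_eq_mapH lst hpre, pvC lst hpre []]
  rw [List.map_congr_left (fun p hp => ?_), List.map_id]
  · rfl
  · obtain ⟨x, xs, rfl⟩ : ∃ x xs, lst = x :: xs := by
      cases lst with | nil => exact absurd rfl hpre | cons a l => exact ⟨a, l, rfl⟩
    have := pvParts_ne_nil (f := (x :: xs).length) hp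
    cases p with
    | nil => exact absurd rfl this
    | cons h t => simp [pvPfx]
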